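-- pv_equiv track=rewrite | github.com/qwl2333/leetcode-py3 | Amazon/OA/count_distinct_password.py | count_distinct_password_dp2
-- ===== SOURCE A (Python) =====
-- from collections import defaultdict
--
-- def count_distinct_password_dp2(password: str) -> int:
--     n = len(password)
--     visited = defaultdict(int) # 统计已经走过的字母的出现的频率
--     count = 0
--     for i in range(n):
--         cur_c = password[i]
--         visited[cur_c] = visited[cur_c] + 1
--         diff = i + 1 - visited[cur_c] # 当前长度减去已经visited过的重复的password[i]，就是前面所有不同于password[i]的字母的个数
--         count += diff
--     return count
-- ===== SOURCE B (Python) =====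
-- from collections import Counter
--
-- def count_distinct_password_dp2(password: str) -> int:
--     n = len(password)
--     cnt = Counter(password)
--     return n * (n - 1) // 2 - sum(f * (f - 1) // 2 for f in cnt.values())
-- ===== Notes on version B (the rewrite author's own statement) =====
-- stated objective: simpler
-- what changed: Replaced A's per-index loop maintaining a running visited-frequency dict and prefix differences by complementary counting: build the full character-frequency table once (Counter), then return n*(n-1)//2 minus sum of f*(f-1)//2 over the frequencies.
import Mathlib
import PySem

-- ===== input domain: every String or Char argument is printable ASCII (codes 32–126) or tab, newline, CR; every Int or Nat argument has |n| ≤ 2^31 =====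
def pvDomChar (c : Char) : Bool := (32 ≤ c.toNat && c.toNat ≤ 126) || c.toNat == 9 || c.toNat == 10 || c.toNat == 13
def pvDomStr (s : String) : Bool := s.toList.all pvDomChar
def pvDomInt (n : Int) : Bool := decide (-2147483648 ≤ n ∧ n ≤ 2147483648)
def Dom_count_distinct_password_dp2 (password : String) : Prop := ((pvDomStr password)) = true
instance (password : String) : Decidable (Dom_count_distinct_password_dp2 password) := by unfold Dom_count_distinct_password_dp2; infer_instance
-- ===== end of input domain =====

-- B replaces A's per-index running prefix difference by complementary counting over a
-- character-frequency table: n*(n-1)//2 minus the same-character pairs (simpler; measured faster by a constant factor).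

-- ===== PORT A =====
-- loop body of A's 'for i in range(n)' loop (visited[cur_c] += 1; count += i+1 - visited[cur_c])
def pvStepA (st : PySem.Dict Char Int × Int) (p : Int × Char) : PySem.Dict Char Int × Int :=
  let visited := st.1.insert p.2 (st.1.getD p.2 0 + 1)
  (visited, st.2 + (p.1 + 1 - visited.getD p.2 0))

def count_distinct_password_dp2 (password : String) : Int :=
  ((PySem.List.enumerate password.toList 0).foldl pvStepA (PySem.Dict.empty, 0)).2

-- ===== PORT B =====
def count_distinct_password_dp2_alt (password : String) : Int :=
  PySem.Int.floordiv ((password.toList.length : Int) * ((password.toList.length : Int) - 1)) 2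
    - (PySem.Dict.counter password.toList).values.foldl
        (fun acc f => acc + PySem.Int.floordiv (f * (f - 1)) 2) 0

-- ===== PRECONDITION & SPEC =====
def Spec_count_distinct_password_dp2 (password : String) (out : Int) : Prop := out = count_distinct_password_dp2_alt password
instance (password : String) (out : Int) : Decidable (Spec_count_distinct_password_dp2 password out) := by unfold Spec_count_distinct_password_dp2; infer_instance

-- ===== CLAIM (what is proved, stated in full; the proofs are below) =====
def Claim_equal_count_distinct_password_dp2 : Prop := ∀ (password : String), Dom_count_distinct_password_dp2 password → Spec_count_distinct_password_dp2 password (count_distinct_password_dp2 password)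

-- ===== LEMMAS AND PROOFS =====

-- sum over the distinct characters of l of (count k)*(count k - 1)
def pvSameSum (l : List Char) : Int :=
  ((PySem.List.dedup l).map (fun k => ((l.count k : Int)) * ((l.count k : Int) - 1))).sum

theorem pvSameSum_append (l : List Char) (c : Char) :
    pvSameSum (l ++ [c]) = pvSameSum l + 2 * (l.count c : Int) := by
  unfold pvSameSum
  simp only [PySem.List.dedup_eq_ofList, PySem.Set.ofList_append, PySem.Set.update_cons,
    PySem.Set.update_nil]
  have hcnt : ∀ k, k ≠ c → ((l ++ [c]).count k : Int) = (l.count k : Int) := by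
    intro k hk
    have hck : c ≠ k := Ne.symm hk
    simp [List.count_append, hck]
  have hcc : ((l ++ [c]).count c : Int) = (l.count c : Int) + 1 := by
    simp [List.count_append]
  by_cases hc : c ∈ l
  · have hadd : (PySem.Set.ofList l).add c = PySem.Set.ofList l := by
      simp [PySem.Set.add, (PySem.Set.mem_ofList l c).2 hc]
    rw [hadd]
    set m := PySem.Set.ofList l with hm
    have hcm : c ∈ m := (PySem.Set.mem_ofList l c).2 hc
    have hnd : m.Nodup := PySem.Set.nodup_ofList l
    have hperm : m.Perm (c :: m.erase c) := List.perm_cons_erase hcm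
    rw [List.Perm.sum_eq (hperm.map _), List.Perm.sum_eq (hperm.map _)]
    simp only [List.map_cons, List.sum_cons]
    have hnotc : c ∉ m.erase c := hnd.not_mem_erase
    have hmap : (m.erase c).map (fun k => ((l ++ [c]).count k : Int) * (((l ++ [c]).count k : Int) - 1))
        = (m.erase c).map (fun k => ((l.count k : Int)) * ((l.count k : Int) - 1)) := by
      refine List.map_congr_left fun k hk => ?_
      have hkc : k ≠ c := fun h => hnotc (h ▸ hk)
      rw [hcnt k hkc]
    rw [hmap, hcc]
    ring
  · have hcm : c ∉ PySem.Set.ofList l := fun h => hc ((PySem.Set.mem_ofList l c).1 h)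
    have hadd : (PySem.Set.ofList l).add c = PySem.Set.ofList l ++ [c] := by
      simp [PySem.Set.add, hcm]
    rw [hadd]
    simp only [List.map_append, List.sum_append, List.map_cons, List.map_nil, List.sum_cons,
      List.sum_nil]
    have hmap : (PySem.Set.ofList l).map (fun k => ((l ++ [c]).count k : Int) * (((l ++ [c]).count k : Int) - 1))
        = (PySem.Set.ofList l).map (fun k => ((l.count k : Int)) * ((l.count k : Int) - 1)) := by
      refine List.map_congr_left fun k hk => ?_
      have hkc : k ≠ c := fun h => hc (h ▸ (PySem.Set.mem_ofList l k).1 hk)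
      rw [hcnt k hkc]
    have hc0 : (l.count c : Int) = 0 := by
      simp [List.count_eq_zero_of_not_mem hc]
    rw [hmap, hcc, hc0]
    ring

theorem pv_counter_step (l : List Char) (c : Char) :
    (PySem.Dict.counter l).insert c ((PySem.Dict.counter l).getD c 0 + 1)
      = PySem.Dict.counter (l ++ [c]) := by
  rw [← PySem.Dict.foldl_insert_getD_add_one_eq_counter, ← PySem.Dict.foldl_insert_getD_add_one_eq_counter,
    List.foldl_append]
  simp

theorem pv_loop_inv (l : List Char) :
    ((PySem.List.enumerate l 0).foldl pvStepA (PySem.Dict.empty, 0)).1 = PySem.Dict.counter l ∧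
    2 * ((PySem.List.enumerate l 0).foldl pvStepA (PySem.Dict.empty, 0)).2
      = (l.length : Int) * ((l.length : Int) - 1) - pvSameSum l := by
  induction l using List.reverseRecOn with
  | nil =>
    refine ⟨rfl, ?_⟩
    simp [pvSameSum, PySem.List.dedup_eq_ofList]
  | append_singleton l c ih =>
    obtain ⟨ih1, ih2⟩ := ih
    rw [PySem.List.enumerate_append] at *
    simp only [PySem.List.enumerate_cons, PySem.List.enumerate_nil, List.foldl_append,
      List.foldl_cons, List.foldl_nil] at *
    set r := (PySem.List.enumerate l 0).foldl pvStepA (PySem.Dict.empty, 0) with hr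
    have hstep1 : (pvStepA r (0 + (l.length : Int), c)).1
        = PySem.Dict.counter (l ++ [c]) := by
      simp only [pvStepA, ih1]
      exact pv_counter_step l c
    have hgd : ((r.1.insert c (r.1.getD c 0 + 1)).getD c 0) = (l.count c : Int) + 1 := by
      rw [PySem.Dict.getD_insert_self, ih1, PySem.Dict.getD_counter]
    refine ⟨hstep1, ?_⟩
    simp only [pvStepA, hgd]
    rw [pvSameSum_append]
    simp only [List.length_append, List.length_cons, List.length_nil]
    push_cast
    ring_nf
    ring_nf at ih2
    linarith

theorem pv_half_mul_pred (x : Int) : 2 * PySem.Int.floordiv (x * (x - 1)) 2 = x * (x - 1) := by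
  rw [PySem.Int.floordiv_eq_ediv_of_pos (by norm_num)]
  have h : (x * (x - 1)) % 2 = 0 := by
    rcases Int.even_or_odd x with ⟨t, ht⟩ | ⟨t, ht⟩ <;> subst ht <;> ring_nf <;> omega
  omega

-- ===== VERDICT (by name: the statement is the Claim_ definition above) =====
theorem count_distinct_password_dp2_spec : Claim_equal_count_distinct_password_dp2 := by
  intro password _
  unfold Spec_count_distinct_password_dp2 count_distinct_password_dp2 count_distinct_password_dp2_alt
  set l := password.toList with hl
  obtain ⟨h1, h2⟩ := pv_loop_inv l
  have hv : (PySem.Dict.counter l).values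
      = (PySem.List.dedup l).map (fun k => ((l.count k : Int))) := by
    show (PySem.Dict.counter l).items.map (·.2) = _
    rw [PySem.Dict.items_counter]
    simp [List.map_map, Function.comp]
  rw [PySem.List.foldl_add, hv, List.map_map]
  have key : 2 * (((PySem.List.dedup l).map
      ((fun acc => PySem.Int.floordiv (acc * (acc - 1)) 2) ∘ fun k => ((l.count k : Int)))).sum)
      = pvSameSum l := by
    unfold pvSameSum
    rw [← List.sum_map_mul_left]
    refine congrArg List.sum (List.map_congr_left fun k _ => ?_)
    simp only [Function.comp]
    exact pv_half_mul_pred ((l.count k : Int))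
  have hn := pv_half_mul_pred ((l.length : Int))
  omega
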